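-- pv_equiv track=rewrite | github.com/Neogul02/Algorithm | 프로그래머스/0/120921. 문자열 밀기/문자열 밀기.py | solution
-- ===== SOURCE A (Python) =====
-- def solution(A, B):
--     answer = 0
--     arr = list(A)
--     last_list = []
--     if A == B:
--         return 0
--     for i in range(len(A)):
--
--         last_list.append(arr.pop(-1))
--         if ''.join(list(reversed(last_list))+arr) == B:
--             return i+1
--
--     return -1
-- ===== SOURCE B (Python) =====
-- def solution(A, B):
--     if A == B:
--         return 0
--     if len(A) != len(B):
--         return -1
--     return (B + B).find(A, 1)
-- ===== Notes on version B (the rewrite author's own statement) =====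
-- stated objective: faster
-- what changed: Instead of materially popping characters one by one and rebuilding each right-rotation for an O(n^2) scan, B uses the classic rotation trick: the smallest right-shift k>=1 with rot(A,k)=B is the first index >=1 at which A occurs in B+B, found by a single substring search.
import Mathlib
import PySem

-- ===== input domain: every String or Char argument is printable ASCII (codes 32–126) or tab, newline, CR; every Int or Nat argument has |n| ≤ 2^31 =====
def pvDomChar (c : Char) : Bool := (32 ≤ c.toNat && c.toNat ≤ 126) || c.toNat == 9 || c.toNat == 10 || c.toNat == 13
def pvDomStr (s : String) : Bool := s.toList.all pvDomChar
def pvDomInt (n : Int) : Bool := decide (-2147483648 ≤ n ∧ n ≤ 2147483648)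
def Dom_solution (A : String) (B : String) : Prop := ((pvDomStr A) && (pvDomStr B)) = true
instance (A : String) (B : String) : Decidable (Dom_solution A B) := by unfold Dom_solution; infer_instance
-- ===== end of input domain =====

-- B changes the algorithm: first offset ≥ 1 of A in B+B (one substring search) instead of rebuilding every rotation; objective: faster (asymptotic).

-- ===== PORT A =====
-- the for-loop: fuel = remaining iterations, i = loop counter, arr / last = Python's arr / last_list
def solutionGo (fuel : Nat) (i : Int) (arr last Bl : List Char) : Int :=
  match fuel with
  | 0 => -1
  | fuel + 1 =>
    match PySem.List.pop? arr (-1) with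
    | none => -1   -- Python would raise IndexError here; unreachable (arr always has `fuel+1` elements)
    | some (x, arr') =>
      let last' := last ++ [x]
      if last'.reverse ++ arr' = Bl then i + 1
      else solutionGo fuel (i + 1) arr' last' Bl

def solution (A : String) (B : String) : Int :=
  if A.toList = B.toList then 0
  else solutionGo A.toList.length 0 A.toList [] B.toList

-- ===== PORT B =====
def solution_alt (A : String) (B : String) : Int :=
  if A.toList = B.toList then 0
  else if A.toList.length ≠ B.toList.length then -1
  else PySem.Chars.findFrom (B.toList ++ B.toList) A.toList 1 none

-- ===== PRECONDITION & SPEC =====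
def Spec_solution (A : String) (B : String) (out : Int) : Prop := out = solution_alt A B
instance (A : String) (B : String) (out : Int) : Decidable (Spec_solution A B out) := by unfold Spec_solution; infer_instance

-- ===== CLAIM (what is proved, stated in full; the proofs are below) =====
def Claim_equal_solution : Prop := ∀ (A : String) (B : String), Dom_solution A B → Spec_solution A B (solution A B)

-- ===== LEMMAS AND PROOFS =====

theorem solutionGo_step (Al Bl : List Char) (d : Nat) (hd : d < Al.length) (i : Int) :
    solutionGo (d+1) i (Al.take (d+1)) ((Al.drop (d+1)).reverse) Bl
    = if Al.drop d ++ Al.take d = Bl then i + 1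
      else solutionGo d (i+1) (Al.take d) ((Al.drop d).reverse) Bl := by
  rw [List.take_succ_eq_append_getElem hd]
  show (match PySem.List.pop? (Al.take d ++ [Al[d]]) (-1) with
    | none => (-1 : Int)
    | some (x, arr') =>
      let last' := (Al.drop (d+1)).reverse ++ [x]
      if last'.reverse ++ arr' = Bl then i + 1
      else solutionGo d (i + 1) arr' last' Bl) = _
  rw [PySem.List.pop?_last]
  have h1 : ((Al.drop (d+1)).reverse ++ [Al[d]]).reverse = Al.drop d := by
    simp [List.getElem_cons_drop hd]
  have h2 : (Al.drop (d+1)).reverse ++ [Al[d]] = (Al.drop d).reverse := by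
    rw [← h1, List.reverse_reverse]
  simp only [h2, List.reverse_reverse]

theorem solutionGo_none (fuel : Nat) (Al Bl : List Char) (hf : fuel ≤ Al.length)
    (h : ∀ d, d < fuel → Al.drop d ++ Al.take d ≠ Bl) (i : Int) :
    solutionGo fuel i (Al.take fuel) ((Al.drop fuel).reverse) Bl = -1 := by
  induction fuel generalizing i with
  | zero => rfl
  | succ d ih =>
      rw [solutionGo_step Al Bl d (by omega) i, if_neg (h d (by omega))]
      exact ih (by omega) (fun d' hd' => h d' (by omega)) (i+1)

theorem solutionGo_found (fuel : Nat) (Al Bl : List Char) (hf : fuel ≤ Al.length)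
    (d : Nat) (hd : d < fuel) (hmatch : Al.drop d ++ Al.take d = Bl)
    (hmax : ∀ d', d < d' → d' < fuel → Al.drop d' ++ Al.take d' ≠ Bl) (i : Int) :
    solutionGo fuel i (Al.take fuel) ((Al.drop fuel).reverse) Bl = i + (fuel - d : Nat) := by
  induction fuel generalizing i with
  | zero => omega
  | succ f ih =>
      rw [solutionGo_step Al Bl f (by omega) i]
      by_cases hdf : d = f
      · subst hdf; rw [if_pos hmatch]
        have h1 : d + 1 - d = 1 := by omega
        rw [h1]; norm_num
      · rw [if_neg (hmax f (by omega) (by omega))]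
        rw [ih (by omega) (by omega) (fun d' h1 h2 => hmax d' h1 (by omega)) (i+1)]
        have : (f + 1 - d) = (f - d) + 1 := by omega
        rw [this]; push_cast; ring

theorem rot_flip_one (Al Bl : List Char) (k : Nat) (hlen : Al.length = Bl.length) (hk : k ≤ Al.length)
    (h : Al.drop (Al.length - k) ++ Al.take (Al.length - k) = Bl) : Bl.drop k ++ Bl.take k = Al := by
  have hlen1 : (Al.drop (Al.length - k)).length = k := by simp; omega
  have hdrop : Bl.drop k = Al.take (Al.length - k) := by
    rw [← h, List.drop_left' hlen1]
  have htake : Bl.take k = Al.drop (Al.length - k) := by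
    rw [← h, List.take_left' hlen1]
  rw [hdrop, htake, List.take_append_drop]

theorem rot_flip (Al Bl : List Char) (k : Nat) (hlen : Al.length = Bl.length) (hk : k ≤ Al.length) :
    Al.drop (Al.length - k) ++ Al.take (Al.length - k) = Bl ↔ Bl.drop k ++ Bl.take k = Al := by
  constructor
  · exact rot_flip_one Al Bl k hlen hk
  · intro h
    have hk' : Bl.length - (Al.length - k) = k := by omega
    exact rot_flip_one Bl Al (Al.length - k) hlen.symm (by omega) (by rw [hk']; exact h)

theorem prefix_double_iff (Al Bl : List Char) (k : Nat) (hlen : Al.length = Bl.length) (hk : k ≤ Bl.length) :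
    Al <+: (Bl ++ Bl).drop k ↔ Bl.drop k ++ Bl.take k = Al := by
  have hdd : (Bl ++ Bl).drop k = Bl.drop k ++ Bl := by
    rw [List.drop_append_of_le_length hk]
  rw [hdd, List.prefix_iff_eq_take, List.take_append]
  have e1 : (Bl.drop k).take Al.length = Bl.drop k := List.take_of_length_le (by simp; omega)
  have e2 : Al.length - (Bl.drop k).length = k := by simp; omega
  rw [e1, e2, eq_comm]

theorem main (A B : String) :
    (if A.toList = B.toList then 0
     else solutionGo A.toList.length 0 A.toList [] B.toList)
    = (if A.toList = B.toList then 0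
       else if A.toList.length ≠ B.toList.length then -1
       else PySem.Chars.findFrom (B.toList ++ B.toList) A.toList 1 none) := by
  set Al := A.toList with hA
  set Bl := B.toList with hB
  by_cases hab : Al = Bl
  · simp [hab]
  · rw [if_neg hab, if_neg hab]
    have estate : solutionGo Al.length 0 Al [] Bl
        = solutionGo Al.length 0 (Al.take Al.length) ((Al.drop Al.length).reverse) Bl := by simp
    by_cases hlen : Al.length ≠ Bl.length
    · rw [if_pos hlen, estate]
      apply solutionGo_none Al.length Al Bl le_rfl
      intro d hd he
      apply hlen
      have := congrArg List.length he
      simp at this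
      omega
    · rw [if_neg hlen]
      rw [not_not] at hlen
      have hn : 1 ≤ Al.length := by
        rcases Nat.eq_zero_or_pos Al.length with h0 | h1
        · exfalso; apply hab
          have : Bl.length = 0 := by omega
          rw [List.length_eq_zero_iff] at h0
          rw [List.length_eq_zero_iff] at this
          rw [h0, this]
        · exact h1
      have hone : (1 : Int) = ((1 : Nat) : Int) := by norm_num
      have hk1 : (1 : Nat) ≤ (Bl ++ Bl).length := by simp; omega
      set j := PySem.Chars.findFrom (Bl ++ Bl) Al 1 none with hj
      by_cases hjn : j = -1
      · rw [hjn, estate]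
        have hninf : ¬ Al <:+: (Bl ++ Bl).drop 1 := by
          rw [hj, hone] at hjn
          exact (PySem.Chars.findFrom_natCast_eq_neg_one_iff (Bl ++ Bl) Al 1 hk1).mp hjn
        apply solutionGo_none Al.length Al Bl le_rfl
        intro d hd he
        apply hninf
        have hrot : Bl.drop (Al.length - d) ++ Bl.take (Al.length - d) = Al := by
          have hd2 : Al.length - (Al.length - d) = d := by omega
          exact (rot_flip Al Bl (Al.length - d) hlen (by omega)).mp (by rw [hd2]; exact he)
        have hpre : Al <+: (Bl ++ Bl).drop (Al.length - d) :=
          (prefix_double_iff Al Bl (Al.length - d) hlen (by omega)).mpr hrot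
        have hsuf : (Bl ++ Bl).drop (Al.length - d) <:+ (Bl ++ Bl).drop 1 := by
          have e : (Bl ++ Bl).drop (Al.length - d) = ((Bl ++ Bl).drop 1).drop (Al.length - d - 1) := by
            rw [List.drop_drop]; congr 1; omega
          rw [e]; exact List.drop_suffix _ _
        exact hpre.isInfix.trans hsuf.isInfix
      · have hspec := PySem.Chars.findFrom_natCast_spec (Bl ++ Bl) Al 1 hk1 (by rw [← hone, ← hj]; exact hjn)
        rw [← hone, ← hj] at hspec
        obtain ⟨hge, hpre, hmin⟩ := hspec
        set kn := j.toNat with hkn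
        have hjkn : j = (kn : Int) := by
          rw [hkn]; exact (Int.toNat_of_nonneg (by omega)).symm
        have hkn1 : 1 ≤ kn := by omega
        have hknn : kn ≤ Al.length := by
          have hl := hpre.length_le
          have : ((Bl ++ Bl).drop kn).length = Bl.length + Bl.length - kn := by simp
          rw [this] at hl
          omega
        have hrotd : Al.drop (Al.length - kn) ++ Al.take (Al.length - kn) = Bl := by
          have hrot : Bl.drop kn ++ Bl.take kn = Al :=
            (prefix_double_iff Al Bl kn hlen (by omega)).mp hpre
          exact (rot_flip Al Bl kn hlen hknn).mpr hrot
        rw [estate]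
        rw [solutionGo_found Al.length Al Bl le_rfl (Al.length - kn) (by omega) hrotd ?_ 0]
        · rw [hjkn]
          have : Al.length - (Al.length - kn) = kn := by omega
          rw [this]; ring
        · intro d' hd1 hd2 he
          have hk' : 1 ≤ Al.length - d' ∧ Al.length - d' < kn := by omega
          apply hmin (Al.length - d') hk'.1 hk'.2
          apply (prefix_double_iff Al Bl (Al.length - d') hlen (by omega)).mpr
          have hd3 : Al.length - (Al.length - d') = d' := by omega
          exact (rot_flip Al Bl (Al.length - d') hlen (by omega)).mp (by rw [hd3]; exact he)

-- ===== VERDICT (by name: the statement is the Claim_ definition above) =====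
theorem solution_spec : Claim_equal_solution := by
  intro A B _
  show solution A B = solution_alt A B
  unfold solution solution_alt
  exact main A B
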